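-- pv_equiv track=rewrite | github.com/Narudayo/backjoon | python/array/OXquiz.py | score
-- ===== SOURCE A (Python) =====
-- def score(str):
--     count = 0
--     sum = 0
--     for i in range(len(str)):
--         if str[i]=="O":
--             count +=1
--         else :
--             count = 0
--         sum += count
--     return sum
-- ===== SOURCE B (Python) =====
-- from itertools import groupby
--
--
-- def score(str):
--     total = 0
--     for is_o, grp in groupby(str, key=lambda c: c == "O"):
--         if is_o:
--             n = sum(1 for _ in grp)
--             total += n * (n + 1) // 2
--     return total
-- ===== Notes on version B (the rewrite author's own statement) =====
-- stated objective: simpler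
-- what changed: Instead of maintaining a char-by-char running streak counter, B splits the string into maximal runs with itertools.groupby and adds the closed-form triangular number L*(L+1)//2 for each 'O'-run.
import Mathlib
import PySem

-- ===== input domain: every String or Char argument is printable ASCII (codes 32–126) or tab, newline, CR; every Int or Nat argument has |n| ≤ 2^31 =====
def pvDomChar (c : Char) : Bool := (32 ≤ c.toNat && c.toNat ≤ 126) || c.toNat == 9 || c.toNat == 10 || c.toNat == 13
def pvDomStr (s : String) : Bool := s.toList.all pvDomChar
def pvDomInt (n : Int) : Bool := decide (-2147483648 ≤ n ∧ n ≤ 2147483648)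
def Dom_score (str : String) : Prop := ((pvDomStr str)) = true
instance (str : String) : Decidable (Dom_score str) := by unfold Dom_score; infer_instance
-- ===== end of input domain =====

-- B replaces A's running streak counter by summing the closed-form triangular
-- number L*(L+1)//2 over each maximal run of 'O' (groupby); objective: simpler.

-- ===== PORT A =====
-- A walks the string once, keeping (count, sum): count resets on non-'O'.
def score (str : String) : Int :=
  (str.toList.foldl
    (fun (st : Int × Int) c =>
      let count : Int := if c = 'O' then st.1 + 1 else 0
      (count, st.2 + count))
    (0, 0)).2

-- ===== PORT B =====
-- G: take the maximal 'O'- or non-'O'-run at the head (groupby with key c=='O');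
-- an 'O'-run of length n contributes n*(n+1)//2, other runs contribute 0.
def scoreAltGo : List Char → Int
  | [] => 0
  | c :: cs =>
    if c = 'O' then
      let n : Int := ((1 + (cs.takeWhile (fun x => x = 'O')).length : Nat) : Int)
      PySem.Int.floordiv (n * (n + 1)) 2 + scoreAltGo (cs.dropWhile (fun x => x = 'O'))
    else
      scoreAltGo (cs.dropWhile (fun x => ¬ (x = 'O')))
  termination_by l => l.length
  decreasing_by
  · exact Nat.lt_succ_of_le (List.length_dropWhile_le _ _)
  · exact Nat.lt_succ_of_le (List.length_dropWhile_le _ _)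

def score_alt (str : String) : Int := scoreAltGo str.toList

-- ===== PRECONDITION & SPEC =====
def Spec_score (str : String) (out : Int) : Prop := out = score_alt str
instance (str : String) (out : Int) : Decidable (Spec_score str out) := by unfold Spec_score; infer_instance

-- ===== CLAIM (what is proved, stated in full; the proofs are below) =====
def Claim_equal_score : Prop := ∀ (str : String), Dom_score str → Spec_score str (score str)

-- ===== LEMMAS AND PROOFS =====

-- the extra sum A's fold accumulates when started with streak counter `count`
def gSum (count : Int) : List Char → Int
  | [] => 0
  | c :: cs => if c = 'O' then (count + 1) + gSum (count + 1) cs else gSum 0 cs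

theorem foldl_eq_gSum (l : List Char) : ∀ (count s : Int),
    (l.foldl (fun (st : Int × Int) c =>
      let cnt : Int := if c = 'O' then st.1 + 1 else 0
      (cnt, st.2 + cnt)) (count, s)).2 = s + gSum count l := by
  induction l with
  | nil => intro count s; simp [gSum]
  | cons c cs ih =>
    intro count s
    by_cases h : c = 'O'
    · simp [List.foldl, gSum, h, ih]; ring
    · simp [List.foldl, gSum, h, ih]

theorem gSum_reset (l : List Char) (count : Int) (h : ∀ c, l.head? = some c → c ≠ 'O') :
    gSum count l = gSum 0 l := by
  cases l with
  | nil => rfl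
  | cons c cs =>
    have : c ≠ 'O' := h c rfl
    simp [gSum, this]

theorem gSum_skip_nonO (l : List Char) :
    gSum 0 l = gSum 0 (l.dropWhile (fun x => ¬ (x = 'O'))) := by
  induction l with
  | nil => rfl
  | cons c cs ih =>
    by_cases h : c = 'O'
    · simp [List.dropWhile, h]
    · simp [List.dropWhile, h, gSum, ih]

-- triangular numbers
def tri (k : Nat) : Int := ((k * (k + 1) / 2 : Nat) : Int)

theorem tri_succ (k : Nat) : tri (k + 1) = tri k + (k + 1) := by
  unfold tri
  have h1 : (k + 1) * (k + 1 + 1) = k * (k + 1) + 2 * (k + 1) := by ring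
  have h2 : (k * (k + 1) + 2 * (k + 1)) / 2 = k * (k + 1) / 2 + (k + 1) :=
    Nat.add_mul_div_left _ _ (by norm_num)
  rw [h1, h2]; push_cast; ring

theorem floordiv_tri (k : Nat) :
    PySem.Int.floordiv ((k : Int) * ((k : Int) + 1)) 2 = tri k := by
  have h : (k : Int) * ((k : Int) + 1) = ((k * (k + 1) : Nat) : Int) := by push_cast; ring
  rw [h]
  exact_mod_cast PySem.Int.floordiv_natCast (k * (k + 1)) 2

theorem gSum_run (j : Nat) : ∀ (count : Int) (rest : List Char),
    gSum count (List.replicate j 'O' ++ rest) =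
      count * j + tri j + gSum (count + j) rest := by
  induction j with
  | zero => intro count rest; simp [tri]
  | succ j ih =>
    intro count rest
    simp only [List.replicate_succ, List.cons_append, gSum, if_pos, ih, tri_succ]
    push_cast; ring_nf

theorem takeWhile_O_replicate (l : List Char) :
    l.takeWhile (fun x => x = 'O') =
      List.replicate (l.takeWhile (fun x => x = 'O')).length 'O' := by
  apply List.eq_replicate_of_mem
  intro c hc
  have := List.mem_takeWhile_imp hc
  simpa using this

theorem head_dropWhile_not_O (l : List Char) (c : Char)
    (h : (l.dropWhile (fun x => x = 'O')).head? = some c) : c ≠ 'O' := by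
  have := List.head?_dropWhile_not (p := fun x => x = 'O') l
  rw [h] at this
  simpa using this

theorem gSum_eq_scoreAltGo (n : Nat) : ∀ (l : List Char), l.length ≤ n →
    gSum 0 l = scoreAltGo l := by
  induction n with
  | zero =>
    intro l hl
    have : l = [] := List.eq_nil_of_length_eq_zero (Nat.le_zero.mp hl)
    subst this; simp [gSum, scoreAltGo]
  | succ n ih =>
    intro l hl
    cases l with
    | nil => simp [gSum, scoreAltGo]
    | cons c cs =>
      by_cases h : c = 'O'
      · subst h
        set t := (cs.takeWhile (fun x => x = 'O')).length with ht
        have hdecomp : 'O' :: cs =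
            List.replicate (t + 1) 'O' ++ cs.dropWhile (fun x => x = 'O') := by
          rw [List.replicate_succ]
          simp only [List.cons_append, List.cons.injEq, true_and]
          conv_lhs => rw [← List.takeWhile_append_dropWhile (p := fun x => decide (x = 'O')) (l := cs)]
          rw [ht, ← takeWhile_O_replicate]
        have hrest : (cs.dropWhile (fun x => x = 'O')).length ≤ n := by
          have h1 := List.length_dropWhile_le (fun x => x = 'O') cs
          simp only [List.length_cons] at hl
          omega
        calc gSum 0 ('O' :: cs)
            = gSum 0 (List.replicate (t + 1) 'O' ++ cs.dropWhile (fun x => x = 'O')) := by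
              rw [← hdecomp]
          _ = 0 * (t + 1) + tri (t + 1) + gSum (0 + (t + 1)) (cs.dropWhile (fun x => x = 'O')) :=
              gSum_run (t + 1) 0 _
          _ = tri (t + 1) + gSum 0 (cs.dropWhile (fun x => x = 'O')) := by
              rw [gSum_reset _ _ (head_dropWhile_not_O cs)]; ring
          _ = tri (t + 1) + scoreAltGo (cs.dropWhile (fun x => x = 'O')) := by
              rw [ih _ hrest]
          _ = scoreAltGo ('O' :: cs) := by
              rw [scoreAltGo]
              simp only [if_true, ← ht, show 1 + t = t + 1 from by omega]
              rw [floordiv_tri (t + 1)]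
      · have hstep : gSum 0 (c :: cs) = gSum 0 (cs.dropWhile (fun x => ¬ (x = 'O'))) := by
          rw [show gSum 0 (c :: cs) = gSum 0 cs from by simp [gSum, h]]
          exact gSum_skip_nonO cs
        have hrest : (cs.dropWhile (fun x => ¬ (x = 'O'))).length ≤ n := by
          have h1 := List.length_dropWhile_le (fun x => ¬ (x = 'O')) cs
          simp only [List.length_cons] at hl
          omega
        rw [hstep, ih _ hrest, scoreAltGo, if_neg h]

-- ===== VERDICT (by name: the statement is the Claim_ definition above) =====
theorem score_spec : Claim_equal_score := by
  intro str _
  unfold Spec_score score score_alt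
  rw [foldl_eq_gSum]
  simpa using gSum_eq_scoreAltGo str.toList.length str.toList le_rfl
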